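-- pv_equiv track=rewrite | github.com/viky1998/thesis_code | Butterfly/Butterfly_old.py | get_index_and_c
-- ===== SOURCE A (Python) =====
-- def get_index_and_c(lst):
--     current_sum = 0
--     for i in range(len(lst)):
--         current_sum += lst[i]
--         if current_sum > 256:
--             if i+1 < len(lst):
--                 index_for_c = i+1
--                 current_c = lst[i+1]
--                 # return [index_for_c, current_c]
--             else: return None
--
--             # check if any value in the list before c is smaller than c
--             for j in range(index_for_c):
--                 if lst[j] < current_c:
--                     current_c = lst[j]
--             return [index_for_c, current_c]
--     return None
-- ===== SOURCE B (Python) =====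
-- def get_index_and_c(lst):
--     current_sum = 0
--     running_min = 0
--     for i, x in enumerate(lst):
--         current_sum += x
--         running_min = x if i == 0 else min(running_min, x)
--         if current_sum > 256:
--             if i + 1 < len(lst):
--                 return [i + 1, min(running_min, lst[i + 1])]
--             return None
--     return None
-- ===== Notes on version B (the rewrite author's own statement) =====
-- stated objective: simpler
-- what changed: Single fused pass maintaining the running minimum alongside the prefix sum, removing A's separate inner scan over the prefix when the threshold is crossed.
import Mathlib
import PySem

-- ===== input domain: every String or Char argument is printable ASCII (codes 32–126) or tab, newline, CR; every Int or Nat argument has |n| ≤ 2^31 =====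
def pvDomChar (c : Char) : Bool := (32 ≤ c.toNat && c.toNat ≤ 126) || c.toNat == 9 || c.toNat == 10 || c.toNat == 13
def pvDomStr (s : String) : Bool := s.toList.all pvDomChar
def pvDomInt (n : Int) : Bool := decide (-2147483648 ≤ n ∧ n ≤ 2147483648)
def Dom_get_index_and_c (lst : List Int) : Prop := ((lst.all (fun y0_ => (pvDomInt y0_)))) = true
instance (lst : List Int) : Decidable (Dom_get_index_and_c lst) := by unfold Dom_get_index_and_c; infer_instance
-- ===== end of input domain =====

-- B fuses A's separate min-scan over the prefix into the accumulation pass (one loop, running minimum); objective: simpler.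

-- ===== PORT A =====
-- A's outer loop over i in range(len(lst)), carrying current_sum; the inner
-- loop over j in range(index_for_c) is the foldl over List.range (i+1).
def get_index_and_c_loopA (lst : List Int) (i : Nat) (currentSum : Int) : Option (List Int) :=
  if h : i < lst.length then
    let currentSum' := currentSum + lst.getD i 0
    if currentSum' > 256 then
      if i + 1 < lst.length then
        some [(i : Int) + 1,
          (List.range (i + 1)).foldl
            (fun c j => if lst.getD j 0 < c then lst.getD j 0 else c)
            (lst.getD (i + 1) 0)]
      else none
    else get_index_and_c_loopA lst (i + 1) currentSum'
  else none
termination_by lst.length - i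

def get_index_and_c (lst : List Int) : Option (List Int) :=
  get_index_and_c_loopA lst 0 0

-- ===== PORT B =====
-- B's single fused loop: structural recursion over the remaining list,
-- carrying the index, the prefix sum and the running minimum.
def get_index_and_c_loopB (rest : List Int) (i : Nat) (currentSum : Int) (runningMin : Int) : Option (List Int) :=
  match rest with
  | [] => none
  | x :: rs =>
    let currentSum' := currentSum + x
    let m := if i = 0 then x else min runningMin x
    if currentSum' > 256 then
      match rs with
      | [] => none
      | y :: _ => some [(i : Int) + 1, min m y]
    else get_index_and_c_loopB rs (i + 1) currentSum' m

def get_index_and_c_alt (lst : List Int) : Option (List Int) :=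
  get_index_and_c_loopB lst 0 0 0

-- ===== PRECONDITION & SPEC =====
def Spec_get_index_and_c (lst : List Int) (out : Option (List Int)) : Prop := out = get_index_and_c_alt lst
instance (lst : List Int) (out : Option (List Int)) : Decidable (Spec_get_index_and_c lst out) := by unfold Spec_get_index_and_c; infer_instance

-- ===== CLAIM (what is proved, stated in full; the proofs are below) =====
def Claim_equal_get_index_and_c : Prop := ∀ (lst : List Int), Dom_get_index_and_c lst → Spec_get_index_and_c lst (get_index_and_c lst)

-- ===== LEMMAS AND PROOFS =====

-- minimum of the first i elements (meaningful for 1 ≤ i ≤ lst.length)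
def prefMin (lst : List Int) (i : Nat) : Int :=
  match lst.take i with
  | [] => 0
  | a :: t => t.foldl min a

lemma if_lt_eq_min (a c : Int) : (if a < c then a else c) = min c a := by
  simp only [min_def]; split_ifs <;> omega

lemma foldl_range_min (lst : List Int) :
    ∀ (n : Nat) (c0 : Int), n ≤ lst.length →
    (List.range n).foldl (fun c j => if lst.getD j 0 < c then lst.getD j 0 else c) c0
      = (lst.take n).foldl min c0 := by
  intro n
  induction n with
  | zero => intro c0 _; simp
  | succ n ih =>
    intro c0 hn
    have hlt : n < lst.length := hn
    have hg : lst[n]? = some lst[n] := List.getElem?_eq_getElem hlt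
    rw [List.range_succ, List.foldl_append, ih c0 (Nat.le_of_lt hlt)]
    simp only [List.foldl_cons, List.foldl_nil, if_lt_eq_min]
    have htake : lst.take (n + 1) = lst.take n ++ [lst[n]] := by
      rw [List.take_add_one]; simp [hg]
    rw [htake, List.foldl_append]
    simp [List.getD, hg]

lemma foldl_min_swap : ∀ (xs : List Int) (a y : Int),
    min (xs.foldl min a) y = xs.foldl min (min y a) := by
  intro xs
  induction xs with
  | nil => intro a y; simp [min_comm]
  | cons x xs ih =>
    intro a y
    simp only [List.foldl_cons]
    rw [ih (min a x) y]
    congr 1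
    simp only [min_def]; split_ifs <;> omega

lemma prefMin_succ (lst : List Int) (i : Nat) (h : i < lst.length) :
    prefMin lst (i + 1) = if i = 0 then lst.getD i 0 else min (prefMin lst i) (lst.getD i 0) := by
  have hget : lst[i]? = some lst[i] := List.getElem?_eq_getElem h
  have htake : lst.take (i + 1) = lst.take i ++ [lst[i]] := by
    rw [List.take_add_one]; simp [hget]
  rcases hi : lst.take i with _ | ⟨a, t⟩
  · have hlen : min i lst.length = 0 := by
      rw [← List.length_take]; simp [hi]
    have : i = 0 := by omega
    subst this
    simp [prefMin, htake, hi, List.getD, hget]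
  · have hi0 : i ≠ 0 := by
      intro h0; subst h0; simp at hi
    simp only [prefMin, htake, hi, List.cons_append, List.foldl_cons, List.foldl_append,
      List.foldl_nil, if_neg hi0]
    simp [List.getD, hget]

lemma cval_eq (lst : List Int) (i : Nat) (hi : i < lst.length) (c0 : Int) :
    (lst.take (i + 1)).foldl min c0 = min (prefMin lst (i + 1)) c0 := by
  rcases hi1 : lst.take (i + 1) with _ | ⟨a, t⟩
  · exfalso
    have hlen : min (i + 1) lst.length = 0 := by
      rw [← List.length_take]; simp [hi1]
    omega
  · simp only [prefMin, hi1, List.foldl_cons]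
    rw [foldl_min_swap t a c0, min_comm c0 a]

lemma loop_eq (lst : List Int) : ∀ (k i : Nat) (s rmin : Int),
    lst.length - i = k → (i ≠ 0 → rmin = prefMin lst i) →
    get_index_and_c_loopA lst i s = get_index_and_c_loopB (lst.drop i) i s rmin := by
  intro k
  induction k with
  | zero =>
    intro i s rmin hk _
    have hge : lst.length ≤ i := by omega
    rw [get_index_and_c_loopA, List.drop_eq_nil_of_le hge]
    simp [get_index_and_c_loopB, Nat.not_lt.mpr hge]
  | succ k ih =>
    intro i s rmin hk hrm
    have hlt : i < lst.length := by omega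
    have hdrop : lst.drop i = lst[i] :: lst.drop (i + 1) :=
      List.drop_eq_getElem_cons hlt
    have hgetD : lst.getD i 0 = lst[i] := by
      simp [List.getD, List.getElem?_eq_getElem hlt]
    have hm : (if i = 0 then lst[i] else min rmin lst[i]) = prefMin lst (i + 1) := by
      rw [prefMin_succ lst i hlt, hgetD]
      by_cases h0 : i = 0
      · simp [h0]
      · simp [h0, hrm h0]
    rw [get_index_and_c_loopA, dif_pos hlt, hdrop]
    simp only [get_index_and_c_loopB, hgetD]
    rw [hm]
    split_ifs with hsum hnext
    · -- threshold crossed, i+1 < length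
      have hdrop1 : lst.drop (i + 1) = lst[i + 1] :: lst.drop (i + 2) :=
        List.drop_eq_getElem_cons hnext
      have hgetD1 : lst.getD (i + 1) 0 = lst[i + 1] := by
        simp [List.getD, List.getElem?_eq_getElem hnext]
      rw [hdrop1, hgetD1,
        foldl_range_min lst (i + 1) lst[i + 1] (Nat.le_of_lt hnext),
        cval_eq lst i hlt]
    · -- threshold crossed, i+1 = length
      have hnil : lst.drop (i + 1) = [] := List.drop_eq_nil_of_le (by omega)
      rw [hnil]
    · -- continue the loop
      exact ih (i + 1) (s + lst[i]) (prefMin lst (i + 1)) (by omega) (fun _ => rfl)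

-- ===== VERDICT (by name: the statement is the Claim_ definition above) =====
theorem get_index_and_c_spec : Claim_equal_get_index_and_c := by
  intro lst _
  unfold Spec_get_index_and_c get_index_and_c get_index_and_c_alt
  rw [loop_eq lst lst.length 0 0 0 (by omega) (by intro h; exact absurd rfl h)]
  simp
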